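-- pv_equiv track=rewrite | github.com/maksverver/AdventOfCode | 2021/24.py | EvalZ
-- ===== SOURCE A (Python) =====
-- divz = [   1,   1,   1,  26,  26,   1,  26,  26,   1,   1,  26,   1,  26,  26]
--
-- addx = [  12,  13,  13,  -2, -10,  13, -14,  -5,  15,  15, -14,  10, -14,  -5]
--
-- addy = [   7,   8,  10,   4,   4,   6,  11,  13,   1,   8,   4,  13,   4,  14]
--
-- def EvalZ(code):
--     z = 0
--     for i, w in enumerate(code):
--         x = z % 26 + addx[i]
--         z //= divz[i]
--         if x != w:
--             z = 26*z + w + addy[i]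
--     return z
-- ===== SOURCE B (Python) =====
-- divz = [   1,   1,   1,  26,  26,   1,  26,  26,   1,   1,  26,   1,  26,  26]
-- addx = [  12,  13,  13,  -2, -10,  13, -14,  -5,  15,  15, -14,  10, -14,  -5]
-- addy = [   7,   8,  10,   4,   4,   6,  11,  13,   1,   8,   4,  13,   4,  14]
--
-- def EvalZ(code):
--     # z kept as a base-26 digit stack (top = end) over a bottom accumulator `base`
--     base = 0
--     stack = []
--     for i, w in enumerate(code):
--         top = stack[-1] if stack else base
--         x = top % 26 + addx[i]
--         if divz[i] == 26:
--             if stack: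
--                 c = stack.pop() // 26
--                 if stack:
--                     stack[-1] += c
--                 else:
--                     base += c
--             else:
--                 base //= 26
--         if x != w:
--             stack.append(w + addy[i])
--     z = base
--     for d in stack:
--         z = 26 * z + d
--     return z
-- ===== Notes on version B (the rewrite author's own statement) =====
-- stated objective: alternative
-- what changed: B replaces the single integer z by an explicit base-26 digit stack over a bottom accumulator (push on z = 26*z + d, pop with carry on z //= 26, peek for z % 26), folding the stack back into an integer only at the end; A mutates the integer directly.
import Mathlib
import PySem

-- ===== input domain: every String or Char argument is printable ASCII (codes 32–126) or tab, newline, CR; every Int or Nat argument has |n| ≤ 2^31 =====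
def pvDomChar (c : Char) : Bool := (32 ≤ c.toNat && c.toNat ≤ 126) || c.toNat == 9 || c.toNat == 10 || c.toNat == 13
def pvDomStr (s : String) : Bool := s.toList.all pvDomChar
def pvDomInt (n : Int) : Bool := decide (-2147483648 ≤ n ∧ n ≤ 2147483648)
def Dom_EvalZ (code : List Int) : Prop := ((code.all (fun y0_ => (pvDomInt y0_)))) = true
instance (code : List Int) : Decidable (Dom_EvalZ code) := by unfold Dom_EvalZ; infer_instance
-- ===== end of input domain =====

-- B keeps z as an explicit base-26 digit stack (top at end) over a bottom accumulator
-- instead of a single integer, folding the stack back into an integer at the end.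

def divzL : List Int := [1, 1, 1, 26, 26, 1, 26, 26, 1, 1, 26, 1, 26, 26]
def addxL : List Int := [12, 13, 13, -2, -10, 13, -14, -5, 15, 15, -14, 10, -14, -5]
def addyL : List Int := [7, 8, 10, 4, 4, 6, 11, 13, 1, 8, 4, 13, 4, 14]

-- ===== PORT A =====
-- loop body: x = z % 26 + addx[i]; z //= divz[i]; if x != w: z = 26*z + w + addy[i]
-- (addx[i]/divz[i]/addy[i] via pyGet?; out-of-range — an IndexError in Python — is excluded by Pre_)
def stepA (i : Nat) (w z : Int) : Int :=
  let x := PySem.Int.mod z 26 + (PySem.List.pyGet? addxL (i : Int)).getD 0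
  let z1 := PySem.Int.floordiv z ((PySem.List.pyGet? divzL (i : Int)).getD 1)
  if x ≠ w then 26 * z1 + w + (PySem.List.pyGet? addyL (i : Int)).getD 0 else z1

def EvalZgo : List Int → Nat → Int → Int
  | [], _, z => z
  | w :: rest, i, z => EvalZgo rest (i + 1) (stepA i w z)

def EvalZ (code : List Int) : Int := EvalZgo code 0 0

-- ===== PORT B =====
-- loop body over state (base, stack): top = stack[-1] if stack else base;
-- x = top % 26 + addx[i]; pop with carry when divz[i] == 26; push w + addy[i] if x != w
def stepB (i : Nat) (w base : Int) (stack : List Int) : Int × List Int :=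
  let top := (PySem.List.pyGet? stack (-1)).getD base
  let x := PySem.Int.mod top 26 + (PySem.List.pyGet? addxL (i : Int)).getD 0
  let p : Int × List Int :=
    if (PySem.List.pyGet? divzL (i : Int)).getD 1 = 26 then
      if stack ≠ [] then
        let c := PySem.Int.floordiv (stack.getLast!) 26
        let s' := stack.dropLast
        if s' ≠ [] then (base, s'.dropLast ++ [s'.getLast! + c]) else (base + c, s')
      else (PySem.Int.floordiv base 26, stack)
    else (base, stack)
  if x ≠ w then (p.1, p.2 ++ [w + (PySem.List.pyGet? addyL (i : Int)).getD 0]) else p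

def EvalZaltGo : List Int → Nat → Int → List Int → Int × List Int
  | [], _, base, stack => (base, stack)
  | w :: rest, i, base, stack =>
    let r := stepB i w base stack
    EvalZaltGo rest (i + 1) r.1 r.2

def EvalZ_alt (code : List Int) : Int :=
  let r := EvalZaltGo code 0 0 []
  r.2.foldl (fun z d => 26 * z + d) r.1

-- ===== PRECONDITION & SPEC =====
-- Pre_ excludes lists longer than the 14-entry constant tables, on which Python A raises IndexError.
def Pre_EvalZ (code : List Int) : Prop := code.length ≤ 14
instance (code : List Int) : Decidable (Pre_EvalZ code) := by unfold Pre_EvalZ; infer_instance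
def pvWitness_EvalZ : List Int := [9, 1, 3, 7, 0, -4, 2]

def Spec_EvalZ (code : List Int) (out : Int) : Prop := out = EvalZ_alt code
instance (code : List Int) (out : Int) : Decidable (Spec_EvalZ code out) := by unfold Spec_EvalZ; infer_instance

-- ===== CLAIM (what is proved, stated in full; the proofs are below) =====
def Claim_equal_EvalZ : Prop := ∀ (code : List Int), Dom_EvalZ code → Pre_EvalZ code → Spec_EvalZ code (EvalZ code)

-- ===== LEMMAS AND PROOFS =====

-- the integer B's state denotes
def pvEncode (base : Int) (stack : List Int) : Int :=
  stack.foldl (fun z d => 26 * z + d) base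

theorem pvEncode_append (b : Int) (s : List Int) (t : Int) :
    pvEncode b (s ++ [t]) = 26 * pvEncode b s + t := by
  simp [pvEncode, List.foldl_append]

theorem pvGetLast!_append (u : List Int) (v : Int) : (u ++ [v]).getLast! = v := by
  cases u with
  | nil => simp [List.getLast!]
  | cons a as => simp [List.getLast!]

theorem pvDivz_cases (i : Nat) (h : i < 14) :
    (PySem.List.pyGet? divzL (i : Int)).getD 1 = 1 ∨
    (PySem.List.pyGet? divzL (i : Int)).getD 1 = 26 := by
  interval_cases i <;> simp [divzL]

-- peeking the top digit mod 26 equals z % 26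
theorem pvPeek (b : Int) (s : List Int) :
    PySem.Int.mod (pvEncode b s) 26 = PySem.Int.mod ((PySem.List.pyGet? s (-1)).getD b) 26 := by
  rcases s.eq_nil_or_concat with rfl | ⟨s', t, rfl⟩
  · simp [pvEncode, PySem.List.pyGet?]
  · rw [List.concat_eq_append, pvEncode_append, PySem.List.pyGet?_neg_one_append_singleton]
    rw [PySem.Int.mod_eq_emod_of_pos (by norm_num), PySem.Int.mod_eq_emod_of_pos (by norm_num)]
    simp only [Option.getD_some]
    omega

-- popping the top digit with carry equals z // 26
theorem pvPop (b t : Int) (s' : List Int) :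
    pvEncode
      (if s' ≠ [] then (b, s'.dropLast ++ [s'.getLast! + PySem.Int.floordiv t 26])
       else (b + PySem.Int.floordiv t 26, s') : Int × List Int).1
      (if s' ≠ [] then (b, s'.dropLast ++ [s'.getLast! + PySem.Int.floordiv t 26])
       else (b + PySem.Int.floordiv t 26, s') : Int × List Int).2
      = PySem.Int.floordiv (pvEncode b (s' ++ [t])) 26 := by
  rw [PySem.Int.floordiv_eq_ediv_of_pos (by norm_num), pvEncode_append,
      PySem.Int.floordiv_eq_ediv_of_pos (by norm_num : (0:Int) < 26)]
  rcases s'.eq_nil_or_concat with rfl | ⟨u, v, rfl⟩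
  · simp [pvEncode]
    omega
  · rw [List.concat_eq_append]
    have hne : u ++ [v] ≠ [] := by simp
    rw [if_pos hne]
    simp only [List.dropLast_concat, pvGetLast!_append]
    rw [pvEncode_append, pvEncode_append]
    omega

-- one loop iteration commutes with the encoding
theorem pvStep (i : Nat) (hi : i < 14) (w b : Int) (s : List Int) :
    stepA i w (pvEncode b s) = pvEncode (stepB i w b s).1 (stepB i w b s).2 := by
  have hx := pvPeek b s
  rcases pvDivz_cases i hi with hd | hd
  · -- divz[i] = 1: no pop, z unchanged by the division
    simp only [stepA, stepB, hd, hx, if_neg (show ¬((1:Int) = 26) by norm_num)]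
    rw [PySem.Int.floordiv_eq_ediv_of_pos (by norm_num : (0:Int) < 1), Int.ediv_one]
    split_ifs with hxw
    · simp only [pvEncode_append]
      ring
    · rfl
  · -- divz[i] = 26: pop with carry
    simp only [stepA, stepB, hd, hx]
    rcases s.eq_nil_or_concat with rfl | ⟨s', t, rfl⟩
    · simp only [ne_eq, not_true_eq_false, if_false]
      split_ifs with hxw <;>
        simp [pvEncode, PySem.Int.floordiv] <;> omega
    · rw [List.concat_eq_append]
      have hne : s' ++ [t] ≠ [] := by simp
      rw [if_pos hne]
      simp only [List.dropLast_concat, pvGetLast!_append]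
      have hpop := pvPop b t s'
      generalize hq :
        (if s' ≠ [] then (b, s'.dropLast ++ [s'.getLast! + PySem.Int.floordiv t 26])
         else (b + PySem.Int.floordiv t 26, s') : Int × List Int) = q
      rw [hq] at hpop
      split_ifs with hxw
      · simp only [pvEncode_append] at hpop ⊢
        simp [hpop]
        omega
      · exact hpop.symm

theorem pvMain (code : List Int) : ∀ (i : Nat) (base : Int) (stack : List Int),
    i + code.length ≤ 14 →
    EvalZgo code i (pvEncode base stack) =
      pvEncode (EvalZaltGo code i base stack).1 (EvalZaltGo code i base stack).2 := by
  induction code with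
  | nil => intro i base stack _; simp [EvalZgo, EvalZaltGo]
  | cons w rest ih =>
    intro i base stack hlen
    have hi : i < 14 := by simp at hlen; omega
    simp only [EvalZgo, EvalZaltGo]
    rw [pvStep i hi w base stack]
    exact ih (i + 1) _ _ (by simp at hlen ⊢; omega)

-- ===== VERDICT (by name: the statement is the Claim_ definition above) =====
theorem EvalZ_spec : Claim_equal_EvalZ := by
  intro code _ hpre
  unfold Spec_EvalZ EvalZ EvalZ_alt
  have := pvMain code 0 0 [] (by simpa [Pre_EvalZ] using hpre)
  simpa [pvEncode] using this
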